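-- pv_equiv track=rewrite | github.com/FORGIVEUSJONATHAN/15112ProjectZhijie | setting.py | getMulti
-- ===== SOURCE A (Python) =====
-- def getMulti(numList):
--     multi = []
--     listCopy = numList[:]
--     for i in numList:
--         if listCopy.count(i) >= 2:
--             multi.append(i)
--             while i in listCopy:
--                 listCopy.remove(i) # tList1 No double
--     return multi
-- ===== SOURCE B (Python) =====
-- def getMulti(numList):
--     counts = {}
--     for i in numList:
--         counts[i] = counts.get(i, 0) + 1
--     return [k for k, v in counts.items() if v >= 2]
-- ===== Notes on version B (the rewrite author's own statement) =====
-- stated objective: faster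
-- what changed: Replaces A's per-element full-list count() scans and repeated remove() loops on a shrinking copy with a single counting pass building an insertion-ordered dict, then one pass emitting the keys whose count is at least 2.
import Mathlib
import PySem

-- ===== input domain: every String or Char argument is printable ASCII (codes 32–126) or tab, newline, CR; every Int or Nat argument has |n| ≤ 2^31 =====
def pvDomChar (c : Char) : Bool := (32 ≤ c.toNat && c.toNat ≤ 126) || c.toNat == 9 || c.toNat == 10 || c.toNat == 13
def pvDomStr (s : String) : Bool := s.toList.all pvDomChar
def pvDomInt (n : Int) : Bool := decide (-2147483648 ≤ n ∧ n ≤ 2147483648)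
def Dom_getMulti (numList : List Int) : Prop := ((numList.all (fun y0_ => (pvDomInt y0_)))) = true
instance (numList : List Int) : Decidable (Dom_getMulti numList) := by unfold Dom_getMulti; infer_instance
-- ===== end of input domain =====

-- B replaces A's per-element count/remove scans of a shrinking copy with one counting pass
-- over an ordered dict plus one pass over its items (objective: faster).

-- ===== PORT A =====
-- termination facts for the `while i in listCopy: listCopy.remove(i)` loop (cited by pvRemoveAll)
theorem pvRemoveShrinks {xs ys : List Int} {i : Int}
    (h : PySem.List.remove? xs i = some ys) : ys.length < xs.length := by
  simp [PySem.List.remove?] at h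
  obtain ⟨k, hk, rfl⟩ := h
  obtain ⟨hlt, -⟩ := List.idxOf?_eq_some_iff.mp hk
  simp [List.length_eraseIdx, hlt]
  omega

theorem remove?_of_mem (xs : List Int) (i : Int) (h : i ∈ xs) :
    PySem.List.remove? xs i = some (xs.erase i) := by
  obtain ⟨k, hk⟩ := Option.isSome_iff_exists.mp (List.isSome_idxOf?.mpr h)
  have hidx : xs.idxOf i = k := by rw [List.idxOf_eq_getD_idxOf?, hk]; rfl
  simp [PySem.List.remove?, hk, ← hidx, List.eraseIdx_idxOf_eq_erase]

-- `while i in listCopy: listCopy.remove(i)`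
def pvRemoveAll (i : Int) (xs : List Int) : List Int :=
  if i ∈ xs then pvRemoveAll i ((PySem.List.remove? xs i).getD xs) else xs
termination_by xs.length
decreasing_by
  rename_i h
  rw [remove?_of_mem _ _ h]
  exact pvRemoveShrinks (remove?_of_mem _ _ h)

def getMulti (numList : List Int) : List Int :=
  -- state = (listCopy, multi); listCopy starts as numList[:]
  (numList.foldl
    (fun st i =>
      if 2 ≤ st.1.count i then (pvRemoveAll i st.1, st.2 ++ [i]) else st)
    (PySem.List.slice numList none none, [])).2

-- ===== PORT B =====
def getMulti_alt (numList : List Int) : List Int :=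
  let counts := numList.foldl (fun d x => d.insert x (d.getD x 0 + 1))
    (PySem.Dict.empty : PySem.Dict Int Int)
  (counts.items.filter (fun p => 2 ≤ p.2)).map (fun p => p.1)

-- ===== PRECONDITION & SPEC =====
def Spec_getMulti (numList : List Int) (out : List Int) : Prop := out = getMulti_alt numList
instance (numList : List Int) (out : List Int) : Decidable (Spec_getMulti numList out) := by unfold Spec_getMulti; infer_instance

-- ===== CLAIM (what is proved, stated in full; the proofs are below) =====
def Claim_equal_getMulti : Prop := ∀ (numList : List Int), Dom_getMulti numList → Spec_getMulti numList (getMulti numList)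

-- ===== LEMMAS AND PROOFS =====

theorem erase_filter_ne (l : List Int) (i : Int) :
    (l.erase i).filter (fun x => !(x == i)) = l.filter (fun x => !(x == i)) := by
  induction l with
  | nil => simp
  | cons a l ih =>
    rw [List.erase_cons]
    by_cases h : a = i
    · simp [h]
    · simp [h, ih]

-- the while-loop removes every occurrence of i
theorem pvRemoveAll_eq_filter (i : Int) (xs : List Int) :
    pvRemoveAll i xs = xs.filter (fun x => !(x == i)) := by
  by_cases h : i ∈ xs
  · have hlt : (xs.erase i).length < xs.length := pvRemoveShrinks (remove?_of_mem xs i h)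
    rw [pvRemoveAll, if_pos h, remove?_of_mem xs i h, Option.getD_some,
      pvRemoveAll_eq_filter i (xs.erase i), erase_filter_ne]
  · rw [pvRemoveAll, if_neg h]
    refine (List.filter_eq_self.mpr ?_).symm
    intro x hx
    simp
    rintro rfl
    exact h hx
termination_by xs.length

theorem count_filter_ne (copy : List Int) (i x : Int) :
    (copy.filter (fun y => !(y == i))).count x = if x = i then 0 else copy.count x := by
  split
  · subst x; simp [List.count_eq_zero]
  · rename_i h
    rw [List.count_filter]
    simp [h]

-- folding PySem.Set.add keeps first occurrences of the not-yet-seen elements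
theorem foldl_add_eq (ys : List Int) : ∀ acc : List Int,
    (List.foldl PySem.Set.add acc ys : List Int)
      = acc ++ ((PySem.Set.ofList ys : List Int).filter (fun x => decide (x ∉ acc))) := by
  induction ys with
  | nil => intro acc; simp [PySem.Set.ofList, PySem.Set.empty]
  | cons y ys ih =>
    intro acc
    have hof : (PySem.Set.ofList (y :: ys) : List Int)
        = y :: ((PySem.Set.ofList ys : List Int).filter (fun x => decide (x ∉ ([y]:List Int)))) := by
      show (List.foldl PySem.Set.add (PySem.Set.add PySem.Set.empty y) ys : List Int) = _
      have h0 : (PySem.Set.add PySem.Set.empty y : List Int) = [y] := rfl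
      rw [h0, ih [y]]
      rfl
    rw [List.foldl_cons, ih (PySem.Set.add acc y), hof]
    by_cases hy : y ∈ acc
    · have hadd : (PySem.Set.add acc y : List Int) = acc := by
        simp [PySem.Set.add, PySem.Set.contains, hy]
      rw [hadd, List.filter_cons]
      simp [hy]
      symm
      apply List.filter_congr
      intro x _
      by_cases hxy : x = y
      · subst hxy; simp [hy]
      · simp [hxy]
    · have hadd : (PySem.Set.add acc y : List Int) = acc ++ [y] := by
        simp [PySem.Set.add, PySem.Set.contains, hy]
      rw [hadd, List.filter_cons]
      simp [hy]

theorem ofList_cons_eq (a : Int) (ys : List Int) :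
    (PySem.Set.ofList (a :: ys) : List Int)
      = a :: (PySem.Set.ofList ys : List Int).filter (fun x => !(x == a)) := by
  show (List.foldl PySem.Set.add (PySem.Set.add PySem.Set.empty a) ys : List Int) = _
  have h0 : (PySem.Set.add PySem.Set.empty a : List Int) = [a] := rfl
  rw [h0, foldl_add_eq ys [a]]
  simp only [List.singleton_append, List.mem_singleton, decide_not]
  refine congrArg (a :: ·) (List.filter_congr ?_)
  intro x _
  rw [Bool.beq_eq_decide_eq x a]

theorem ofList_filter (q : Int → Bool) (ys : List Int) :
    (PySem.Set.ofList (ys.filter q) : List Int) = (PySem.Set.ofList ys : List Int).filter q := by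
  induction ys with
  | nil => rfl
  | cons y ys ih =>
    rw [List.filter_cons]
    by_cases hq : q y
    · simp only [hq, if_pos]
      rw [ofList_cons_eq, ih, ofList_cons_eq, List.filter_cons, hq]
      simp only [List.filter_filter]
      congr 1
      apply List.filter_congr
      intro a _
      rw [Bool.and_comm]
    · have hq' : q y = false := by simpa using hq
      simp only [hq', Bool.false_eq_true, if_neg, not_false_iff]
      rw [ih, ofList_cons_eq, List.filter_cons, hq']
      simp only [Bool.false_eq_true, if_neg, not_false_iff, List.filter_filter]
      symm
      apply List.filter_congr
      intro x _
      by_cases hxy : x = y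
      · subst hxy; simp [hq']
      · simp [hxy]

-- the invariant proof for A's loop: listCopy's counts are either 0 (already harvested) or untouched
theorem loopA_spec (full : List Int) :
    ∀ (l copy multi : List Int),
    (∀ x : Int, copy.count x = 0 ∨ copy.count x = full.count x) →
    (l.foldl (fun st i => if 2 ≤ st.1.count i then (pvRemoveAll i st.1, st.2 ++ [i]) else st)
      (copy, multi)).2
      = multi ++ ((PySem.Set.ofList (l.filter (fun x => !(copy.count x == 0))) : List Int).filter
          (fun x => decide (2 ≤ full.count x))) := by
  intro l
  induction l with
  | nil => intro copy multi _; simp [PySem.Set.ofList, PySem.Set.empty]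
  | cons i rest ih =>
    intro copy multi hinv
    rw [List.foldl_cons, List.filter_cons]
    by_cases hc0 : copy.count i = 0
    · have hlt : ¬ 2 ≤ copy.count i := by omega
      rw [if_neg hlt]
      simp only [hc0, beq_self_eq_true, Bool.not_true, Bool.false_eq_true, if_neg, not_false_iff]
      exact ih copy multi hinv
    · have hfull : copy.count i = full.count i := (hinv i).resolve_left hc0
      have hkeep : (!(copy.count i == 0)) = true := by simp [hc0]
      rw [hkeep, if_pos rfl, ofList_cons_eq, List.filter_cons]
      by_cases h2 : 2 ≤ copy.count i
      · rw [if_pos h2]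
        have hp : decide (2 ≤ full.count i) = true := by simp [← hfull, h2]
        rw [hp, if_pos rfl]
        rw [pvRemoveAll_eq_filter]
        have hinv' : ∀ x : Int, ((copy.filter (fun y => !(y == i))).count x = 0)
            ∨ ((copy.filter (fun y => !(y == i))).count x = full.count x) := by
          intro x
          rw [count_filter_ne]
          split
          · exact Or.inl rfl
          · exact hinv x
        rw [ih (copy.filter (fun y => !(y == i))) (multi ++ [i]) hinv']
        have hfe : (fun x => !((copy.filter (fun y => !(y == i))).count x == 0))
            = (fun x => (!(copy.count x == 0)) && !(x == i)) := by
          funext x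
          rw [count_filter_ne]
          by_cases hxy : x = i
          · subst hxy; simp
          · simp [hxy]
        rw [hfe, ← List.filter_filter, ofList_filter, List.append_assoc]
        simp only [ofList_filter, List.filter_filter, List.singleton_append]
        congr 2
        apply List.filter_congr
        intro x _
        rw [Bool.and_comm (!(List.count x copy == 0)) (!(x == i))]
      · rw [if_neg h2]
        have hp : decide (2 ≤ full.count i) = false := by
          simp only [decide_eq_false_iff_not]
          omega
        rw [hp]
        simp only [Bool.false_eq_true, if_neg, not_false_iff]
        rw [ih copy multi hinv]
        congr 1
        rw [List.filter_filter]
        symm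
        apply List.filter_congr
        intro x _
        by_cases hxy : x = i
        · subst hxy; simp [hp]
        · simp [hxy]

theorem getMulti_eq_ref (l : List Int) :
    getMulti l = (PySem.Set.ofList l : List Int).filter (fun x => decide (2 ≤ l.count x)) := by
  unfold getMulti
  have hslice : PySem.List.slice l none none = l := by simp [pysem]
  rw [hslice, loopA_spec l l l [] (fun x => Or.inr rfl)]
  have : l.filter (fun x => !(l.count x == 0)) = l := by
    apply List.filter_eq_self.mpr
    intro x hx
    simp [List.count_eq_zero, hx]
  rw [this, List.nil_append]

theorem getMulti_alt_eq_ref (l : List Int) :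
    getMulti_alt l = (PySem.Set.ofList l : List Int).filter (fun x => decide (2 ≤ l.count x)) := by
  unfold getMulti_alt
  rw [PySem.Dict.foldl_insert_getD_add_one_eq_counter]
  simp only [PySem.Dict.items_counter, List.filter_map, List.map_map]
  have hf : (List.filter ((fun (p : Int × Int) => decide (2 ≤ p.2)) ∘ fun k => (k, (List.count k l : Int))) (PySem.Set.ofList l) : List Int)
      = (PySem.Set.ofList l : List Int).filter (fun x => decide (2 ≤ List.count x l)) := by
    apply List.filter_congr
    intro x _
    simp only [Function.comp_apply, decide_eq_decide]
    omega
  rw [hf]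
  exact List.map_id' _

-- ===== VERDICT (by name: the statement is the Claim_ definition above) =====
theorem getMulti_spec : Claim_equal_getMulti := by
  intro numList _
  unfold Spec_getMulti
  rw [getMulti_eq_ref, getMulti_alt_eq_ref]
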